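-- pv_equiv track=rewrite | github.com/univention/univention-corporate-server | management/univention-directory-manager-modules/modules/univention/admin/handlers/dns/__init__.py | unescapeSOAemail
-- ===== SOURCE A (Python) =====
-- def unescapeSOAemail(email):
--     # type: (str) -> str
--     r"""
--     Un-escape Email-address from DNS SOA record.
--     >>> unescapeSOAemail(r'first\.last.domain.tld')
--     'first.last@domain.tld'
--     """
--     ret = ''
--     i = 0
--     while i < len(email):
--         if email[i] == '\\':
--             i += 1
--             if i >= len(email):
--                 raise ValueError()
--         elif email[i] == '.':
--             i += 1
--             if i >= len(email):
--                 raise ValueError()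
--             ret += '@'
--             ret += email[i:]
--             return ret
--         ret += email[i]
--         i += 1
--     raise ValueError()
-- ===== SOURCE B (Python) =====
-- def unescapeSOAemail(email):
--     # type: (str) -> str
--     r"""
--     Un-escape Email-address from DNS SOA record.
--
--     Find the first unescaped dot (a '.' preceded by an even number of
--     consecutive backslashes), then unescape the part before it and glue
--     the two halves with '@'.
--
--     >>> unescapeSOAemail(r'first\.last.domain.tld')
--     'first.last@domain.tld'
--     """
--     j = email.find('.')
--     while j != -1:
--         k = j - 1
--         while k >= 0 and email[k] == '\\':
--             k -= 1
--         if (j - 1 - k) % 2 == 0: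
--             break
--         j = email.find('.', j + 1)
--     if j == -1 or j == len(email) - 1:
--         raise ValueError()
--     out = []
--     esc = False
--     for c in email[:j]:
--         if esc:
--             out.append(c)
--             esc = False
--         elif c == '\\':
--             esc = True
--         else:
--             out.append(c)
--     return ''.join(out) + '@' + email[j + 1:]
-- ===== Notes on version B (the rewrite author's own statement) =====
-- stated objective: alternative
-- what changed: Replaces A's single-pass character-by-character state machine (cursor plus growing accumulator) by a two-phase algorithm: str.find() jumps from dot to dot and a backslash-run parity test locate the first unescaped dot, then only the prefix before it is unescaped with an escape-flag fold.
import Mathlib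
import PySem

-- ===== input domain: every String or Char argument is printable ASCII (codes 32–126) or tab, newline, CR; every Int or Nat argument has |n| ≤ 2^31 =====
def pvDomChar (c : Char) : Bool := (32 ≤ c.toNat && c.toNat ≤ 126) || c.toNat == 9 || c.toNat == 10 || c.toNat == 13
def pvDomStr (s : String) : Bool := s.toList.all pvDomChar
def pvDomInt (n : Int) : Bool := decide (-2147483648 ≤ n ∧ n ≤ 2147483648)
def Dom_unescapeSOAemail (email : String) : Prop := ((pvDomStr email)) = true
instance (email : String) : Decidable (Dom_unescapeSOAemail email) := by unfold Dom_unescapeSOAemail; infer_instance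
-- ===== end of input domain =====

-- B replaces A's single-pass index/accumulator state machine by a two-phase scan: locate the
-- first unescaped dot with find() jumps plus a backslash-run parity test, then unescape only the
-- prefix (objective: alternative; return value only — neither version mutates its argument).

-- ===== PORT A =====
-- A's while-loop: i is the cursor, ret the accumulator; '\\' consumes two chars, '.' returns.
def runA : List Char → List Char → Option (List Char)
  | [], _ => none                                    -- loop falls off the end: raise ValueError
  | c :: rest, ret =>
    if c = '\\' then
      match rest with
      | [] => none                                   -- trailing backslash: raise ValueError
      | d :: rest' => runA rest' (ret ++ [d])
    else if c = '.' then
      match rest with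
      | [] => none                                   -- dot at the very end: raise ValueError
      | _ :: _ => some (ret ++ '@' :: rest)          -- ret += '@'; ret += email[i:]
    else runA rest (ret ++ [c])

def unescapeSOAemail (email : String) : String :=
  match runA email.toList [] with
  | some cs => String.ofList cs
  | none => ""                                       -- ValueError: excluded by Pre_

-- ===== PORT B =====
-- inner loop 'while k >= 0 and email[k] == "\\": k -= 1'
def bRunBack (l : List Char) (k : Int) : Int :=
  if h : 0 ≤ k ∧ l[k.toNat]? = some '\\' then bRunBack l (k - 1) else k
termination_by (k + 1).toNat
decreasing_by omega

-- outer loop advancing j over dot positions via find; the fuel only makes the recursion total,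
-- it never runs out on a reachable iteration (j strictly increases and stays below the length)
def bLoop (l : List Char) (fuel : Nat) (j : Int) : Int :=
  match fuel with
  | 0 => -1
  | fuel' + 1 =>
    if j = -1 then -1
    else
      let k := bRunBack l (j - 1)
      if (j - 1 - k) % 2 = 0 then j
      else bLoop l fuel' (PySem.Chars.findFrom l ['.'] (j + 1) none)

def unescapeSOAemail_alt (email : String) : String :=
  let l := email.toList
  let j := bLoop l (l.length + 1) (PySem.Chars.find l ['.'])
  if j = -1 ∨ j = (l.length : Int) - 1 then ""       -- ValueError: excluded by Pre_
  else
    let st := (l.take j.toNat).foldl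
      (fun (st : List Char × Bool) c =>
        if st.2 then (st.1 ++ [c], false)
        else if c = '\\' then (st.1, true)
        else (st.1 ++ [c], false)) ([], false)
    String.ofList (st.1 ++ '@' :: l.drop (j.toNat + 1))

-- ===== PRECONDITION & SPEC =====
def bsRun (l : List Char) (j : Nat) : Nat := ((l.take j).reverse.takeWhile (· == '\\')).length

-- Pre_ admits exactly the inputs on which A returns (no ValueError): there is an unescaped dot
-- (an even number of consecutive backslashes directly before it, earlier dots all escaped),
-- and it is not the last character.
def Pre_unescapeSOAemail (email : String) : Prop :=
  ∃ j < email.toList.length - 1, email.toList[j]? = some '.' ∧ bsRun email.toList j % 2 = 0 ∧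
    ∀ i < j, email.toList[i]? = some '.' → bsRun email.toList i % 2 = 1

instance (email : String) : Decidable (Pre_unescapeSOAemail email) := by
  unfold Pre_unescapeSOAemail; infer_instance

def pvWitness_unescapeSOAemail : String := "first\\.last.domain.tld"

def Spec_unescapeSOAemail (email : String) (out : String) : Prop := out = unescapeSOAemail_alt email
instance (email : String) (out : String) : Decidable (Spec_unescapeSOAemail email out) := by
  unfold Spec_unescapeSOAemail; infer_instance

-- ===== CLAIM (what is proved, stated in full; the proofs are below) =====
def Claim_equal_unescapeSOAemail : Prop := ∀ (email : String), Dom_unescapeSOAemail email → Pre_unescapeSOAemail email → Spec_unescapeSOAemail email (unescapeSOAemail email)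

-- ===== LEMMAS AND PROOFS =====

-- what both programs compute on the part before the first unescaped dot
def unesc : List Char → List Char
  | [] => []
  | ['\\'] => []
  | '\\' :: d :: t => d :: unesc t
  | c :: t => c :: unesc t

theorem bsRun_succ (l : List Char) (j : Nat) (h : j < l.length) :
    bsRun l (j + 1) = if l[j] = '\\' then bsRun l j + 1 else 0 := by
  unfold bsRun
  rw [List.take_add_one, List.getElem?_eq_getElem h]
  rw [show (l.take j ++ (some l[j]).toList).reverse = l[j] :: (l.take j).reverse by simp]
  by_cases hx : l[j] = '\\' <;> simp only [List.takeWhile_cons, hx, if_pos] <;> simp [hx]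

theorem takeWhile_append_len (p : Char → Bool) (xs ys : List Char) :
    ((xs ++ ys).takeWhile p).length =
      if (xs.takeWhile p).length = xs.length then xs.length + (ys.takeWhile p).length
      else (xs.takeWhile p).length := by
  induction xs with
  | nil => simp
  | cons x xs ih =>
    by_cases hx : p x
    · simp [hx, ih]
      split_ifs <;> omega
    · simp [hx]

theorem bsRun_cons (c : Char) (l : List Char) (j : Nat) (hc : c ≠ '\\') :
    bsRun (c :: l) (j + 1) = bsRun l j := by
  unfold bsRun
  rw [List.take_succ_cons, List.reverse_cons, takeWhile_append_len]
  have hc' : (c == '\\') = false := by simpa using hc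
  split_ifs with h
  · simp [hc', h]
  · rfl

theorem bsRun_cons_cons (d : Char) (l : List Char) (j : Nat) :
    bsRun ('\\' :: d :: l) (j + 2) % 2 = bsRun l j % 2 := by
  unfold bsRun
  rw [show j + 2 = (j + 1) + 1 by rfl, List.take_succ_cons, List.take_succ_cons,
    List.reverse_cons, List.reverse_cons, List.append_assoc, takeWhile_append_len]
  split_ifs with h
  · rw [h]
    have ht : (List.takeWhile (· == '\\') ([d] ++ ['\\'])).length = 0 ∨
        (List.takeWhile (· == '\\') ([d] ++ ['\\'])).length = 2 := by
      by_cases hd : (d == '\\') <;> simp [hd]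
    omega
  · rfl

theorem runA_eq (n : Nat) : ∀ (l : List Char), l.length ≤ n → ∀ (j : Nat) (ret : List Char),
    j + 1 < l.length → l[j]? = some '.' → bsRun l j % 2 = 0 →
    (∀ i < j, l[i]? = some '.' → bsRun l i % 2 = 1) →
    runA l ret = some (ret ++ (unesc (l.take j) ++ '@' :: l.drop (j + 1))) := by
  induction n with
  | zero =>
    intro l hl j ret hj _ _ _
    exact absurd hj (by omega)
  | succ n ih =>
    intro l hl j ret hj hdot heven hmin
    match l with
    | [] => simp at hj
    | c :: rest =>
      by_cases hc : c = '\\'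
      · subst hc
        match rest with
        | [] => simp at hj
        | d :: rest' =>
          -- j ≥ 2
          have hj0 : j ≠ 0 := by rintro rfl; simp at hdot
          have hj1 : j ≠ 1 := by
            rintro rfl
            have h1 : bsRun ('\\' :: d :: rest') 1 = 1 := by simp [bsRun]
            omega
          obtain ⟨j', rfl⟩ : ∃ j', j = j' + 2 := ⟨j - 2, by omega⟩
          rw [show runA ('\\' :: d :: rest') ret = runA rest' (ret ++ [d]) by simp [runA]]
          rw [ih rest' (by simp at hl ⊢; omega) j' (ret ++ [d])
            (by simp at hj ⊢; omega)
            (by simpa using hdot)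
            (by have := bsRun_cons_cons d rest' j'; omega)
            (by
              intro i hi hdi
              have := hmin (i + 2) (by omega) (by simpa using hdi)
              have h2 := bsRun_cons_cons d rest' i
              omega)]
          simp [unesc, List.append_assoc]
      · by_cases hd : c = '.'
        · subst hd
          have hj0 : j = 0 := by
            by_contra h
            have := hmin 0 (by omega) (by simp)
            simp [bsRun] at this
          subst hj0
          match rest with
          | [] => simp at hj
          | e :: rest' =>
            simp [runA, unesc]
        · have hj0 : j ≠ 0 := by rintro rfl; simp [hd] at hdot
          obtain ⟨j', rfl⟩ : ∃ j', j = j' + 1 := ⟨j - 1, by omega⟩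
          rw [show runA (c :: rest) ret = runA rest (ret ++ [c]) by
            rw [runA.eq_def]; simp [hc, hd]]
          rw [ih rest (by simp at hl ⊢; omega) j' (ret ++ [c])
            (by simp at hj ⊢; omega)
            (by simpa using hdot)
            (by have := bsRun_cons c rest j' hc; omega)
            (by
              intro i hi hdi
              have := hmin (i + 1) (by omega) (by simpa using hdi)
              have h2 := bsRun_cons c rest i hc
              omega)]
          simp [unesc, List.append_assoc, hc]

theorem fold_unesc : ∀ (p : List Char) (acc : List Char),
    (p.foldl
      (fun (st : List Char × Bool) c =>
        if st.2 then (st.1 ++ [c], false)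
        else if c = '\\' then (st.1, true)
        else (st.1 ++ [c], false)) (acc, false)).1 = acc ++ unesc p := by
  intro p
  induction p using unesc.induct with
  | case1 => simp [unesc]
  | case2 => intro acc; simp [unesc, List.foldl]
  | case3 d t ih => intro acc; simp [unesc, List.foldl, ih]
  | case4 c t hne hne2 ih =>
    intro acc
    have hc : c ≠ '\\' := by
      rintro rfl
      cases t with
      | nil => exact hne rfl rfl
      | cons d t' => exact hne2 d t' rfl rfl
    simp [unesc, List.foldl, hc, ih]

theorem singleton_prefix_drop (l : List Char) (i : Nat) (c : Char) :
    ([c] <+: l.drop i) ↔ l[i]? = some c := by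
  have h0 : l[i]? = (l.drop i)[0]? := by rw [List.getElem?_drop]; simp
  rw [h0]
  rcases hd : l.drop i with _ | ⟨x, t⟩
  · simp
  · constructor
    · rintro ⟨u, hu⟩
      simp at hu
      simp [hu.1]
    · intro h
      simp at h
      exact ⟨t, by simp [h]⟩

theorem infix_of_prefix_drop (l sub : List Char) (i : Nat) (h : sub <+: l.drop i) :
    sub <:+: l := by
  obtain ⟨u, hu⟩ := h
  refine ⟨l.take i, u, ?_⟩
  calc l.take i ++ sub ++ u = l.take i ++ (sub ++ u) := by rw [List.append_assoc]
    _ = l.take i ++ l.drop i := by rw [hu]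
    _ = l := List.take_append_drop i l

theorem bRunBack_eq (l : List Char) : ∀ (j : Nat), j ≤ l.length →
    bRunBack l ((j : Int) - 1) = (j : Int) - 1 - bsRun l j := by
  intro j
  induction j with
  | zero =>
    intro _
    rw [bRunBack]
    simp [bsRun]
  | succ j' ih =>
    intro hle
    have hj' : j' < l.length := by omega
    rw [bRunBack]
    have harg : ((j' + 1 : Nat) : Int) - 1 = (j' : Int) := by push_cast; ring
    rw [harg]
    by_cases hx : l[j'] = '\\'
    · rw [dif_pos ⟨by positivity, by simp [List.getElem?_eq_getElem hj', hx]⟩]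
      rw [ih (by omega), bsRun_succ l j' hj', if_pos hx]
      push_cast; ring
    · rw [dif_neg (by
        rintro ⟨-, hmem⟩
        rw [Int.toNat_natCast, List.getElem?_eq_getElem hj'] at hmem
        exact hx (by simpa using hmem))]
      rw [bsRun_succ l j' hj', if_neg hx]
      push_cast; ring

theorem bLoop_eq (l : List Char) (j0 : Nat) (hj0 : j0 + 1 < l.length)
    (hdot : l[j0]? = some '.') (heven : bsRun l j0 % 2 = 0)
    (hmin : ∀ i < j0, l[i]? = some '.' → bsRun l i % 2 = 1) :
    ∀ (fuel m : Nat), m ≤ j0 → l[m]? = some '.' → j0 + 1 - m ≤ fuel →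
    bLoop l fuel (m : Int) = (j0 : Int) := by
  intro fuel
  induction fuel with
  | zero => intro m hm _ hf; omega
  | succ fuel' ih =>
    intro m hm hmdot hf
    have hmlen : m < l.length := (List.getElem?_eq_some_iff.mp hmdot).1
    rw [bLoop]
    rw [if_neg (by omega)]
    rw [bRunBack_eq l m (by omega)]
    show (if ((m : Int) - 1 - ((m : Int) - 1 - (bsRun l m : Int))) % 2 = 0 then (m : Int)
      else bLoop l fuel' (PySem.Chars.findFrom l ['.'] ((m : Int) + 1) none)) = (j0 : Int)
    have hk : (m : Int) - 1 - ((m : Int) - 1 - (bsRun l m : Int)) = (bsRun l m : Int) := by ring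
    rw [hk]
    by_cases hme : m = j0
    · subst hme
      rw [if_pos (by omega)]
    · have hodd := hmin m (by omega) hmdot
      rw [if_neg (by omega)]
      -- the next find
      have hk1 : m + 1 ≤ l.length := by omega
      have hcast : (m : Int) + 1 = ((m + 1 : Nat) : Int) := by push_cast; ring
      rw [hcast]
      have hinf : ['.'] <:+: l.drop (m + 1) := by
        apply infix_of_prefix_drop (l.drop (m + 1)) ['.'] (j0 - (m + 1))
        rw [List.drop_drop]
        rw [show m + 1 + (j0 - (m + 1)) = j0 by omega]
        exact (singleton_prefix_drop l j0 '.').mpr hdot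
      have hne : PySem.Chars.findFrom l ['.'] ((m + 1 : Nat) : Int) none ≠ -1 := by
        rw [Ne, PySem.Chars.findFrom_natCast_eq_neg_one_iff l ['.'] (m + 1) hk1]
        simpa using hinf
      obtain ⟨h1, h2, h3⟩ := PySem.Chars.findFrom_natCast_spec l ['.'] (m + 1) hk1 hne
      set r := PySem.Chars.findFrom l ['.'] ((m + 1 : Nat) : Int) none with hr
      have hrnn : 0 ≤ r := by omega
      have hrr : r = ((r.toNat : Nat) : Int) := by omega
      have hm'le : r.toNat ≤ j0 := by
        by_contra hgt
        exact h3 j0 (by omega) (by omega) ((singleton_prefix_drop l j0 '.').mpr hdot)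
      rw [hrr]
      exact ih r.toNat hm'le ((singleton_prefix_drop l r.toNat '.').mp h2) (by omega)

-- ===== VERDICT (by name: the statement is the Claim_ definition above) =====
theorem unescapeSOAemail_spec : Claim_equal_unescapeSOAemail := by
  intro email _ hpre
  obtain ⟨j, hj, hdot, heven, hmin⟩ := hpre
  unfold Spec_unescapeSOAemail
  have hjlen : j + 1 < email.toList.length := by omega
  -- A's value
  have hA : unescapeSOAemail email =
      String.ofList (unesc (email.toList.take j) ++ '@' :: email.toList.drop (j + 1)) := by
    unfold unescapeSOAemail
    rw [runA_eq email.toList.length email.toList le_rfl j [] hjlen hdot heven hmin]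
    simp
  -- the initial find lands on the first dot, at or before j
  have hne : PySem.Chars.findFrom email.toList ['.'] ((0 : Nat) : Int) none ≠ -1 := by
    rw [Ne, PySem.Chars.findFrom_natCast_eq_neg_one_iff email.toList ['.'] 0 (by omega)]
    intro hno
    exact hno (infix_of_prefix_drop _ _ j (by
      rw [List.drop_drop, Nat.zero_add]
      exact (singleton_prefix_drop email.toList j '.').mpr hdot))
  obtain ⟨h1, h2, h3⟩ := PySem.Chars.findFrom_natCast_spec email.toList ['.'] 0 (by omega) hne
  set r := PySem.Chars.findFrom email.toList ['.'] ((0 : Nat) : Int) none with hr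
  have hrle : r.toNat ≤ j := by
    by_contra hgt
    exact h3 j (by omega) (by omega) ((singleton_prefix_drop email.toList j '.').mpr hdot)
  have hfind : PySem.Chars.find email.toList ['.'] = ((r.toNat : Nat) : Int) := by
    have h0 : PySem.Chars.find email.toList ['.'] = r := by
      rw [hr]; norm_num [PySem.Chars.findFrom_zero]
    rw [h0]; omega
  -- the outer loop of B stops exactly at j
  have hloop : bLoop email.toList (email.toList.length + 1) (PySem.Chars.find email.toList ['.'])
      = (j : Int) := by
    rw [hfind]
    exact bLoop_eq email.toList j hjlen hdot heven hmin (email.toList.length + 1) r.toNat hrle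
      ((singleton_prefix_drop email.toList r.toNat '.').mp h2) (by omega)
  rw [hA]
  show String.ofList _ = unescapeSOAemail_alt email
  simp only [unescapeSOAemail_alt, hloop]
  have hcond : ¬(((j : Nat) : Int) = -1 ∨ ((j : Nat) : Int) = (email.toList.length : Int) - 1) := by
    omega
  rw [if_neg hcond]
  have htn : (((j : Nat) : Int)).toNat = j := by omega
  rw [htn, fold_unesc]
  simp
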